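-- pv_equiv track=rewrite | github.com/Yatharth007Pathak/python-dsa | MinSumOfSquares.py | minValue
-- ===== SOURCE A (Python) =====
-- from collections import Counter
-- import heapq
--
-- def minValue(s, k):
--     # Step 1: Count the frequency of each character
--     freq = Counter(s)
--
--     # Step 2: Use a max-heap (negative of frequencies to simulate max-heap)
--     max_heap = [-count for count in freq.values()]
--     heapq.heapify(max_heap)
--
--     # Step 3: Perform k removals
--     while k > 0 and max_heap:
--         # Pop the most frequent character (negative value, so we add 1)
--         max_freq = heapq.heappop(max_heap)
--         max_freq += 1  # Decrease the frequency by 1 (since it's negative)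
--         k -= 1
--         # If the reduced frequency is still greater than 0, push it back
--         if max_freq < 0:
--             heapq.heappush(max_heap, max_freq)
--
--     # Step 4: Calculate the sum of squares of the remaining frequencies
--     result = 0
--     for freq in max_heap:
--         result += freq ** 2  # freq is negative, so squaring it makes it positive
--
--     return result
-- ===== SOURCE B (Python) =====
-- from collections import Counter
--
-- def minValue(s, k):
--     # Water-filling: sort frequencies descending, flatten the top block level
--     # by level in bulk instead of removing one occurrence at a time.
--     counts = sorted(Counter(s).values(), reverse=True)
--     if k <= 0:
--         return sum(f * f for f in counts)
--     n = len(counts)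
--     m = 0
--     for i in range(n):
--         m += 1
--         h = counts[i]
--         nxt = counts[i + 1] if i + 1 < n else 0
--         if k >= m * (h - nxt):
--             k -= m * (h - nxt)
--         else:
--             d, r = divmod(k, m)
--             lvl = h - d
--             res = (m - r) * lvl * lvl + r * (lvl - 1) * (lvl - 1)
--             for j in range(i + 1, n):
--                 res += counts[j] * counts[j]
--             return res
--     return 0
-- ===== Notes on version B (the rewrite author's own statement) =====
-- stated objective: faster
-- what changed: Replaces the one-removal-at-a-time max-heap simulation by water-filling: sort the character frequencies descending once and flatten the top block level by level in bulk (divmod for the last partial level), then sum the squares directly.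
import Mathlib
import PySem

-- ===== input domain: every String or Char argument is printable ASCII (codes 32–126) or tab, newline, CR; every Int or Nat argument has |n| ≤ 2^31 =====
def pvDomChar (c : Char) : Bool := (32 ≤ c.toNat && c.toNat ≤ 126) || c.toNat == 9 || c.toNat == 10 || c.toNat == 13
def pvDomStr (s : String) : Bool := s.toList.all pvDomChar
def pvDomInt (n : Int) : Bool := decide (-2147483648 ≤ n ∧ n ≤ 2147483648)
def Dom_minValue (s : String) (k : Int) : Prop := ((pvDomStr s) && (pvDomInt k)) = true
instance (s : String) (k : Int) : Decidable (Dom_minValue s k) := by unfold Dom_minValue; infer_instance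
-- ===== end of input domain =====

-- B replaces A's one-removal-at-a-time max-heap loop by water-filling over the
-- descending-sorted frequencies (bulk level drops + divmod), which is faster.

-- ===== PORT A =====
-- Counter(s) = PySem.Dict.counter.  heapq is modelled at its contract: the heap is
-- its list of elements, heappop removes a minimum element, heappush adds an element
-- (the internal heap layout is unobservable in A, which only sums squares at the end).
def heapMinA (heap : List Int) : Int := (PySem.List.min? heap (fun x => x)).getD 0

theorem heapMinA_mem (heap : List Int) (h : heap ≠ []) : heapMinA heap ∈ heap := by
  unfold heapMinA
  cases hm : PySem.List.min? heap (fun x => x) with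
  | none => exact absurd ((PySem.List.min?_eq_none_iff _ _).mp hm) h
  | some m => simpa using PySem.List.min?_mem hm

theorem measure_erase_mem (heap : List Int) (m : Int) (hm : m ∈ heap) :
    heap.length = (heap.erase m).length + 1 ∧
    (heap.map Int.natAbs).sum = ((heap.erase m).map Int.natAbs).sum + m.natAbs := by
  have hperm : heap.Perm (m :: heap.erase m) := List.perm_cons_erase hm
  constructor
  · have := hperm.length_eq; simpa using this
  · have := (hperm.map Int.natAbs).sum_eq; simp at this; omega

-- 'while k > 0 and max_heap: …'
def heapLoopA (k : Int) (heap : List Int) : List Int :=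
  if 0 < k ∧ heap ≠ [] then
    let m := heapMinA heap
    let rest := heap.erase m
    if m + 1 < 0 then heapLoopA (k - 1) (rest ++ [m + 1])
    else heapLoopA (k - 1) rest
  else heap
termination_by heap.length + (heap.map Int.natAbs).sum
decreasing_by
  · have hcond : 0 < k ∧ heap ≠ [] := by assumption
    obtain ⟨h1, h2⟩ := measure_erase_mem heap (heapMinA heap) (heapMinA_mem heap hcond.2)
    simp only [List.length_append, List.map_append, List.sum_append, List.map_cons,
      List.sum_cons, List.length_cons, List.length_nil, List.map_nil, List.sum_nil]
    omega
  · have hcond : 0 < k ∧ heap ≠ [] := by assumption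
    obtain ⟨h1, h2⟩ := measure_erase_mem heap (heapMinA heap) (heapMinA_mem heap hcond.2)
    omega

def minValue (s : String) (k : Int) : Int :=
  let freq := PySem.Dict.counter s.toList
  let maxHeap := freq.values.map (fun count => -count)
  let finalHeap := heapLoopA k maxHeap
  finalHeap.foldl (fun result f => result + f ^ 2) 0

-- ===== PORT B =====
-- the inner 'for i in range(n)' loop with lookahead counts[i+1], early return
def bGo (k : Int) (m : Int) (counts : List Int) : Int :=
  match counts with
  | [] => 0
  | h :: tl =>
      let m' := m + 1
      let nxt := tl.headD 0
      if m' * (h - nxt) ≤ k then bGo (k - m' * (h - nxt)) m' tl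
      else
        let d := PySem.Int.floordiv k m'
        let r := PySem.Int.mod k m'
        let lvl := h - d
        tl.foldl (fun res f => res + f * f)
          ((m' - r) * lvl * lvl + r * (lvl - 1) * (lvl - 1))

def minValue_alt (s : String) (k : Int) : Int :=
  let counts := PySem.List.sorted (PySem.Dict.counter s.toList).values (fun x => x) true
  if k ≤ 0 then counts.foldl (fun acc f => acc + f * f) 0
  else bGo k 0 counts

-- ===== PRECONDITION & SPEC =====
def Spec_minValue (s : String) (k : Int) (out : Int) : Prop := out = minValue_alt s k
instance (s : String) (k : Int) (out : Int) : Decidable (Spec_minValue s k out) := by unfold Spec_minValue; infer_instance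

-- ===== CLAIM (what is proved, stated in full; the proofs are below) =====
def Claim_equal_minValue : Prop := ∀ (s : String) (k : Int), Dom_minValue s k → Spec_minValue s k (minValue s k)

-- ===== LEMMAS AND PROOFS =====

-- reference greedy on the positive frequencies: remove one unit from a maximum
def specDec (l : List Int) : List Int :=
  match PySem.List.max? l (fun x => x) with
  | none => []
  | some M => if 0 < M - 1 then l.erase M ++ [M - 1] else l.erase M

def specMaxA (l : List Int) : Int := (PySem.List.max? l (fun x => x)).getD 0

theorem specMaxA_mem (l : List Int) (h : l ≠ []) : specMaxA l ∈ l := by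
  unfold specMaxA
  cases hm : PySem.List.max? l (fun x => x) with
  | none => exact absurd ((PySem.List.max?_eq_none_iff _ _).mp hm) h
  | some m => simpa using PySem.List.max?_mem hm

theorem specDec_eq (l : List Int) (h : l ≠ []) :
    specDec l = if 0 < specMaxA l - 1 then l.erase (specMaxA l) ++ [specMaxA l - 1]
                else l.erase (specMaxA l) := by
  unfold specDec specMaxA
  cases hm : PySem.List.max? l (fun x => x) with
  | none => exact absurd ((PySem.List.max?_eq_none_iff _ _).mp hm) h
  | some m => simp

def specIter (k : Int) (l : List Int) : List Int :=
  if 0 < k ∧ l ≠ [] then specIter (k - 1) (specDec l) else l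
termination_by l.length + (l.map Int.natAbs).sum
decreasing_by
  rename_i hcond
  obtain ⟨h1, h2⟩ := measure_erase_mem l (specMaxA l) (specMaxA_mem l hcond.2)
  rw [specDec_eq l hcond.2]
  split
  · rename_i hpos
    simp only [List.length_append, List.map_append, List.sum_append, List.map_cons,
      List.sum_cons, List.length_cons, List.length_nil, List.map_nil, List.sum_nil]
    omega
  · omega

def sumSq (l : List Int) : Int := (l.map (fun f => f * f)).sum

theorem sumSq_perm (l l' : List Int) (h : l.Perm l') : sumSq l = sumSq l' :=
  (h.map (fun f => f * f)).sum_eq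

theorem sumSq_append (l l' : List Int) : sumSq (l ++ l') = sumSq l + sumSq l' := by
  simp [sumSq]

theorem sumSq_replicate (n : Nat) (h : Int) : sumSq (List.replicate n h) = n * (h * h) := by
  simp [sumSq, List.sum_replicate]

-- ===== negation bridge (A pops the min of the negated heap = the max frequency) =====
theorem foldl_min_map_neg (t : List Int) (x : Int) :
    (t.map (fun y => -y)).foldl min (-x) = -(t.foldl max x) := by
  induction t generalizing x with
  | nil => rfl
  | cons a t ih => simp only [List.map_cons, List.foldl_cons, min_neg_neg]; exact ih (max x a)

theorem min?_map_neg (l : List Int) :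
    PySem.List.min? (l.map (fun x => -x)) (fun x => x)
      = (PySem.List.max? l (fun x => x)).map (fun x => -x) := by
  cases l with
  | nil =>
      simp only [List.map_nil]
      rw [(PySem.List.min?_eq_none_iff ([] : List Int) (fun x => x)).mpr rfl,
        (PySem.List.max?_eq_none_iff ([] : List Int) (fun x => x)).mpr rfl]
      rfl
  | cons x t =>
      simp only [List.map_cons, PySem.List.min?_id_cons, PySem.List.max?_id_cons, Option.map_some]
      rw [foldl_min_map_neg]

-- ===== specIter toolkit =====
theorem specIter_nonpos (k : Int) (l : List Int) (h : k ≤ 0) : specIter k l = l := by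
  unfold specIter
  simp [show ¬ (0 < k ∧ l ≠ []) from fun hc => absurd hc.1 (by omega)]

theorem specIter_nil (k : Int) : specIter k [] = [] := by
  unfold specIter; simp

theorem specIter_step (k : Int) (l : List Int) (h : 0 < k ∧ l ≠ []) :
    specIter k l = specIter (k - 1) (specDec l) := by
  conv_lhs => rw [specIter]
  rw [if_pos h]

theorem specIter_stop (k : Int) (l : List Int) (h : ¬ (0 < k ∧ l ≠ [])) :
    specIter k l = l := by
  conv_lhs => rw [specIter]
  rw [if_neg h]

theorem specDec_nil : specDec [] = [] := by simp [specDec, PySem.List.max?]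

theorem specDecPow_nil (j : Nat) : specDec^[j] [] = [] := by
  induction j with
  | zero => rfl
  | succ n ih => rw [Function.iterate_succ_apply, specDec_nil, ih]

theorem specIter_chunk (j : Nat) (k : Int) (l : List Int) (hj : (j : Int) ≤ k) :
    specIter k l = specIter (k - j) (specDec^[j] l) := by
  induction j generalizing k l with
  | zero => simp
  | succ n ih =>
      by_cases hl : l = []
      · subst hl; rw [specIter_nil, specDecPow_nil, specIter_nil]
      · have hk : 0 < k := by push_cast at hj; omega
        rw [specIter, if_pos ⟨hk, hl⟩, ih (k - 1) (specDec l) (by push_cast at hj ⊢; omega)]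
        rw [Function.iterate_succ_apply]
        congr 1
        push_cast; ring

theorem max?_eq_of_mem_of_le (l : List Int) (t : Int) (ht : t ∈ l)
    (hle : ∀ y ∈ l, y ≤ t) : PySem.List.max? l (fun x => x) = some t := by
  cases hm : PySem.List.max? l (fun x => x) with
  | none => exact absurd ((PySem.List.max?_eq_none_iff _ _).mp hm) (List.ne_nil_of_mem ht)
  | some m =>
      have h1 : m ∈ l := PySem.List.max?_mem hm
      have h2 := PySem.List.max?_isMax hm
      have : m = t := le_antisymm (hle m h1) (h2 t ht)
      rw [this]

theorem specDec_perm (l l' : List Int) (h : l.Perm l') : (specDec l).Perm (specDec l') := by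
  rcases eq_or_ne l [] with rfl | hl
  · rw [List.perm_nil.mp h.symm]
  · have hl' : l' ≠ [] := fun hn => hl (List.perm_nil.mp (hn ▸ h))
    cases hM : PySem.List.max? l (fun x => x) with
    | none => exact absurd ((PySem.List.max?_eq_none_iff _ _).mp hM) hl
    | some M =>
        have hM' : PySem.List.max? l' (fun x => x) = some M := by
          apply max?_eq_of_mem_of_le
          · exact h.mem_iff.mp (PySem.List.max?_mem hM)
          · intro y hy; exact PySem.List.max?_isMax hM y (h.mem_iff.mpr hy)
        simp only [specDec, hM, hM']
        split
        · exact (h.erase M).append_right [M - 1]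
        · exact h.erase M

theorem specDecPow_perm (j : Nat) (l l' : List Int) (h : l.Perm l') :
    (specDec^[j] l).Perm (specDec^[j] l') := by
  induction j generalizing l l' with
  | zero => simpa
  | succ n ih => rw [Function.iterate_succ_apply, Function.iterate_succ_apply]
                 exact ih _ _ (specDec_perm _ _ h)

theorem specIter_perm (k : Int) (l : List Int) :
    ∀ l', l.Perm l' → (specIter k l).Perm (specIter k l') := by
  induction k, l using specIter.induct with
  | case1 k l hcond ih =>
      intro l' hp
      have hl' : l' ≠ [] := fun hn => hcond.2 (List.perm_nil.mp (hn ▸ hp))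
      rw [specIter_step k l hcond, specIter_step k l' ⟨hcond.1, hl'⟩]
      exact ih _ (specDec_perm _ _ hp)
  | case2 k l hcond =>
      intro l' hp
      rw [specIter_stop k l hcond, specIter_stop k l' ?_]
      · exact hp
      · rintro ⟨hk, hl'⟩
        exact hcond ⟨hk, fun hn => hl' (List.perm_nil.mp (hn ▸ hp.symm))⟩

theorem heapLoopA_step (k : Int) (heap : List Int) (h : 0 < k ∧ heap ≠ []) :
    heapLoopA k heap =
      if heapMinA heap + 1 < 0 then
        heapLoopA (k - 1) (heap.erase (heapMinA heap) ++ [heapMinA heap + 1])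
      else heapLoopA (k - 1) (heap.erase (heapMinA heap)) := by
  conv_lhs => rw [heapLoopA]
  rw [if_pos h]

theorem heapLoopA_stop (k : Int) (heap : List Int) (h : ¬ (0 < k ∧ heap ≠ [])) :
    heapLoopA k heap = heap := by
  conv_lhs => rw [heapLoopA]
  rw [if_neg h]

theorem specMaxA_eq (l : List Int) (M : Int) (hM : PySem.List.max? l (fun x => x) = some M) :
    specMaxA l = M := by
  unfold specMaxA; rw [hM]; rfl

theorem heapLoopA_spec (k : Int) (l : List Int) :
    heapLoopA k (l.map (fun x => -x)) = (specIter k l).map (fun x => -x) := by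
  induction k, l using specIter.induct with
  | case1 k l hcond ih =>
      cases hM : PySem.List.max? l (fun x => x) with
      | none => exact absurd ((PySem.List.max?_eq_none_iff _ _).mp hM) hcond.2
      | some M =>
          have hmin : heapMinA (l.map (fun x => -x)) = -M := by
            unfold heapMinA; rw [min?_map_neg, hM]; rfl
          have hne : l.map (fun x => -x) ≠ [] := by
            simpa using hcond.2
          have herase : (l.map (fun x => -x)).erase (-M) = (l.erase M).map (fun x => -x) :=
            (List.map_erase neg_injective l).symm
          rw [heapLoopA_step k _ ⟨hcond.1, hne⟩, specIter_step k l hcond, hmin, herase]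
          have hdec := specDec_eq l hcond.2
          rw [specMaxA_eq l M hM] at hdec
          by_cases hb : 0 < M - 1
          · rw [if_pos (by omega : -M + 1 < 0)]
            have : (l.erase M).map (fun x => -x) ++ [-M + 1] = (specDec l).map (fun x => -x) := by
              rw [hdec, if_pos hb]
              simp [neg_sub]
              ring_nf
            rw [this, ih]
          · rw [if_neg (by omega : ¬ (-M + 1 < 0))]
            have : (l.erase M).map (fun x => -x) = (specDec l).map (fun x => -x) := by
              rw [hdec, if_neg hb]
            rw [this, ih]
  | case2 k l hcond =>
      rw [specIter_stop k l hcond, heapLoopA_stop k _ ?_]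
      rintro ⟨hk, hl⟩
      exact hcond ⟨hk, fun hn => hl (by simp [hn])⟩

-- one greedy step on the canonical block form
theorem specDec_canon (a : Nat) (t : Int) (ht : 1 ≤ t) (X : List Int)
    (hX : ∀ x ∈ X, x < t) :
    specDec (List.replicate (a + 1) t ++ X)
      = if 0 < t - 1 then (List.replicate a t ++ X) ++ [t - 1]
        else List.replicate a t ++ X := by
  have htmem : t ∈ List.replicate (a + 1) t ++ X := by
    simp [List.mem_append, List.mem_replicate]
  have hmax : PySem.List.max? (List.replicate (a + 1) t ++ X) (fun x => x) = some t := by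
    apply max?_eq_of_mem_of_le _ _ htmem
    intro y hy
    rcases List.mem_append.mp hy with hy | hy
    · exact le_of_eq (List.eq_of_mem_replicate hy)
    · exact le_of_lt (hX y hy)
  have herase : (List.replicate (a + 1) t ++ X).erase t = List.replicate a t ++ X := by
    rw [List.erase_append_left _ (by simp [List.mem_replicate]),
      List.replicate_succ, List.erase_cons_head]
  simp only [specDec, hmax, herase]

-- j ≤ c partial greedy steps at level t
theorem specDec_partial (j c : Nat) (hj : j ≤ c) (t : Int) (ht : 1 ≤ t) (X : List Int)
    (hX : ∀ x ∈ X, 0 < x ∧ x < t) :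
    (specDec^[j] (List.replicate c t ++ X)).Perm
      (List.replicate (c - j) t ++ ((if 1 < t then List.replicate j (t - 1) else []) ++ X)) := by
  induction j with
  | zero => simp
  | succ n ih =>
      have hn : n ≤ c := Nat.le_of_succ_le hj
      have h1 : (specDec^[n + 1] (List.replicate c t ++ X)).Perm
          (specDec (List.replicate (c - n) t ++ ((if 1 < t then List.replicate n (t - 1) else []) ++ X))) := by
        rw [Function.iterate_succ_apply']
        exact specDec_perm _ _ (ih hn)
      refine h1.trans ?_
      have hcn : c - n = (c - (n + 1)) + 1 := by omega
      have hX' : ∀ x ∈ (if 1 < t then List.replicate n (t - 1) else []) ++ X, x < t := by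
        intro x hx
        rcases List.mem_append.mp hx with hx | hx
        · split at hx
          · have := List.eq_of_mem_replicate hx; omega
          · simp at hx
        · exact (hX x hx).2
      rw [hcn, specDec_canon _ _ ht _ hX']
      by_cases h2t : 1 < t
      · rw [if_pos (by omega : (0:Int) < t - 1), if_pos h2t, if_pos h2t,
          List.replicate_succ' (n := n)]
        simp only [List.append_assoc]
        exact ((List.perm_append_comm).append_left _).append_left _
      · rw [if_neg (by omega : ¬ (0:Int) < t - 1), if_neg h2t, if_neg h2t]

-- d full rounds: drop the block of c columns from level t to level t - d
theorem specDec_rounds (d c : Nat) (hc : 0 < c) (t : Int) (ht : 1 ≤ t) (hd : (d : Int) ≤ t)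
    (X : List Int) (hX : ∀ x ∈ X, 0 < x ∧ x ≤ t - d) :
    (specDec^[c * d] (List.replicate c t ++ X)).Perm
      ((if 0 < t - d then List.replicate c (t - d) else []) ++ X) := by
  induction d generalizing t X with
  | zero =>
      simp only [Nat.cast_zero, sub_zero, Nat.mul_zero, Function.iterate_zero, id_eq]
      rw [if_pos (by omega : (0:Int) < t)]
  | succ n ih =>
      have hsplit : c * (n + 1) = c * n + c := by ring
      rw [hsplit, Function.iterate_add_apply]
      have hpart : (specDec^[c] (List.replicate c t ++ X)).Perm
          (List.replicate (c - c) t ++ ((if 1 < t then List.replicate c (t - 1) else []) ++ X)) :=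
        specDec_partial c c le_rfl t ht X
          (fun x hx => ⟨(hX x hx).1, by have := (hX x hx).2; push_cast at this ⊢; omega⟩)
      have hpush := specDecPow_perm (c * n) _ _ hpart
      refine (hpush).trans ?_
      by_cases h2t : 1 < t
      · rw [if_pos h2t]
        simp only [Nat.sub_self, List.replicate_zero, List.nil_append]
        have := ih (t - 1) (by omega) (by push_cast; omega) X
          (fun x hx => ⟨(hX x hx).1, by have := (hX x hx).2; push_cast at this ⊢; omega⟩)
        refine this.trans ?_
        have harith : t - 1 - (n : Int) = t - ((n : Int) + 1) := by ring
        by_cases hpos : (0:Int) < t - (n + 1)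
        · rw [if_pos (by push_cast; omega), if_pos (by push_cast at hpos ⊢; omega)]
          rw [show t - 1 - (n : Int) = t - ((n + 1 : Nat) : Int) by push_cast; ring]
        · rw [if_neg (by push_cast at hpos ⊢; omega), if_neg (by push_cast at hpos ⊢; omega)]
      · -- t = 1, hence n = 0 and X is empty of elements ≤ 0 positive
        have ht1 : t = 1 := by omega
        have hn0 : n = 0 := by
          have : (n : Int) + 1 ≤ t := by push_cast at hd; omega
          omega
        subst ht1; subst hn0
        rw [if_neg h2t]
        simp only [Nat.mul_zero, Function.iterate_zero, id_eq, Nat.sub_self,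
          List.replicate_zero, List.nil_append]
        rw [if_neg (by omega : ¬ (0:Int) < 1 - ((1:Nat) : Int))]
        simp

-- ===== B-side: the water-filling scan computes sumSq ∘ specIter =====
theorem specIter_eq_pow (k : Int) (hk : 0 ≤ k) (l : List Int) :
    specIter k l = specDec^[k.toNat] l := by
  rw [specIter_chunk k.toNat k l (by omega)]
  apply specIter_nonpos; omega

-- the exhausted-budget case: k < c*(h - nxt) removals starting from c columns at h
theorem terminal_case (c h nxt k : Int) (X : List Int) (hc : 1 ≤ c) (hk : 0 ≤ k)
    (hnxt : 0 ≤ nxt) (hlt : k < c * (h - nxt)) (hX : ∀ x ∈ X, 0 < x ∧ x ≤ nxt) :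
    sumSq (specIter k (List.replicate c.toNat h ++ X))
      = (c - PySem.Int.mod k c) * (h - PySem.Int.floordiv k c) * (h - PySem.Int.floordiv k c)
        + PySem.Int.mod k c * (h - PySem.Int.floordiv k c - 1) * (h - PySem.Int.floordiv k c - 1)
        + sumSq X := by
  have hcpos : (0:Int) < c := by omega
  rw [PySem.Int.floordiv_eq_ediv_of_pos hcpos, PySem.Int.mod_eq_emod_of_pos hcpos]
  set d := k / c with hdDef
  set r := k % c with hrDef
  have hd0 : 0 ≤ d := Int.ediv_nonneg hk (by omega)
  have hr0 : 0 ≤ r := Int.emod_nonneg k (by omega)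
  have hrc : r < c := Int.emod_lt_of_pos k hcpos
  have hkdr : c * d + r = k := Int.ediv_add_emod k c
  have hdlt : d < h - nxt := by
    by_contra hcon
    push_neg at hcon
    nlinarith
  have hhn : nxt < h := by nlinarith
  set lvl := h - d with hlvlDef
  have hlvl1 : 1 ≤ lvl := by omega
  -- split the k greedy steps into d full rounds and r extra steps
  have hck : ((c.toNat * d.toNat : Nat) : Int) = c * d := by
    push_cast; rw [Int.toNat_of_nonneg (by omega), Int.toNat_of_nonneg hd0]
  have hkN : k.toNat = r.toNat + c.toNat * d.toNat := by
    generalize hp : c.toNat * d.toNat = p at hck ⊢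
    omega
  rw [specIter_eq_pow k hk, hkN, Function.iterate_add_apply]
  have hrounds : (specDec^[c.toNat * d.toNat] (List.replicate c.toNat h ++ X)).Perm
      (List.replicate c.toNat lvl ++ X) := by
    have := specDec_rounds d.toNat c.toNat (by omega) h (by omega)
      (by rw [Int.toNat_of_nonneg hd0]; omega) X
      (fun x hx => ⟨(hX x hx).1, by
        have h2 := (hX x hx).2; rw [Int.toNat_of_nonneg hd0]; omega⟩)
    rw [Int.toNat_of_nonneg hd0] at this
    rwa [if_pos (by omega : (0:Int) < h - d)] at this
  have hpart : (specDec^[r.toNat] (List.replicate c.toNat lvl ++ X)).Perm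
      (List.replicate (c.toNat - r.toNat) lvl ++
        ((if 1 < lvl then List.replicate r.toNat (lvl - 1) else []) ++ X)) :=
    specDec_partial r.toNat c.toNat (by omega) lvl hlvl1 X
      (fun x hx => ⟨(hX x hx).1, by have h2 := (hX x hx).2; omega⟩)
  have hperm := (specDecPow_perm r.toNat _ _ hrounds).trans hpart
  rw [sumSq_perm _ _ hperm, sumSq_append, sumSq_append, sumSq_replicate]
  have hcr : ((c.toNat - r.toNat : Nat) : Int) = c - r := by omega
  rw [hcr]
  by_cases h2 : 1 < lvl
  · rw [if_pos h2, sumSq_replicate, Int.toNat_of_nonneg hr0]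
    ring
  · have : lvl = 1 := by omega
    rw [if_neg h2, this]
    simp [sumSq]

theorem bGo_spec (tl : List Int) (h m k : Int) (hk : 0 ≤ k) (hm : 0 ≤ m)
    (hpos : ∀ x ∈ h :: tl, 0 < x) (hsort : (h :: tl).Pairwise (fun a b => b ≤ a)) :
    bGo k m (h :: tl) = sumSq (specIter k (List.replicate (m + 1).toNat h ++ tl)) := by
  induction tl generalizing h m k with
  | nil =>
      simp only [bGo, List.headD]
      by_cases hble : (m + 1) * (h - 0) ≤ k
      · rw [if_pos hble]
        -- everything is removed
        have hh1 : 1 ≤ h := hpos h (by simp)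
        have hj : (((m + 1).toNat * h.toNat : Nat) : Int) = (m + 1) * h := by
          push_cast
          rw [Int.toNat_of_nonneg (by omega), Int.toNat_of_nonneg (by omega)]
        have hjk : ((((m + 1).toNat * h.toNat : Nat)) : Int) ≤ k := by
          rw [sub_zero] at hble; omega
        rw [specIter_chunk ((m + 1).toNat * h.toNat) k _ hjk, hj]
        have hrounds := specDec_rounds h.toNat (m + 1).toNat (by omega) h hh1
          (by rw [Int.toNat_of_nonneg (by omega)]) [] (by simp)
        rw [Int.toNat_of_nonneg (by omega : (0:Int) ≤ h)] at hrounds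
        rw [if_neg (by omega : ¬ (0:Int) < h - h)] at hrounds
        simp only [List.append_nil] at hrounds ⊢
        have hnil := List.perm_nil.mp hrounds
        rw [hnil, specIter_nil]
        simp [bGo, sumSq]
      · rw [if_neg hble]
        push_neg at hble
        rw [terminal_case (m + 1) h 0 k [] (by omega) hk le_rfl (by omega) (by simp)]
        simp [sumSq]
  | cons nxt tl2 ih =>
      simp only [bGo, List.headD]
      have hh1 : 1 ≤ h := hpos h (by simp)
      have hnxt1 : 1 ≤ nxt := hpos nxt (by simp)
      have hhn : nxt ≤ h := (List.pairwise_cons.mp hsort).1 nxt (by simp)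
      have htl2 : ∀ x ∈ nxt :: tl2, 0 < x ∧ x ≤ nxt := by
        intro x hx
        rcases List.mem_cons.mp hx with rfl | hx2
        · exact ⟨by omega, le_rfl⟩
        · exact ⟨hpos x (by simp [hx2]),
            (List.pairwise_cons.mp (List.pairwise_cons.mp hsort).2).1 x hx2⟩
      by_cases hble : (m + 1) * (h - nxt) ≤ k
      · rw [if_pos hble]
        have hj : (((m + 1).toNat * (h - nxt).toNat : Nat) : Int) = (m + 1) * (h - nxt) := by
          push_cast
          rw [Int.toNat_of_nonneg (by omega), Int.toNat_of_nonneg (by omega)]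
        have hjk : ((((m + 1).toNat * (h - nxt).toNat : Nat)) : Int) ≤ k := by omega
        rw [specIter_chunk ((m + 1).toNat * (h - nxt).toNat) k _ hjk, hj]
        have hrounds := specDec_rounds (h - nxt).toNat (m + 1).toNat (by omega) h hh1
          (by rw [Int.toNat_of_nonneg (by omega)]; omega) (nxt :: tl2)
          (fun x hx => ⟨(htl2 x hx).1, by
            have := (htl2 x hx).2; rw [Int.toNat_of_nonneg (by omega)]; omega⟩)
        rw [Int.toNat_of_nonneg (by omega : (0:Int) ≤ h - nxt)] at hrounds
        rw [if_pos (by omega : (0:Int) < h - (h - nxt))] at hrounds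
        have hshape : List.replicate (m + 1).toNat (h - (h - nxt)) ++ (nxt :: tl2)
            = List.replicate ((m + 1) + 1).toNat nxt ++ tl2 := by
          have : h - (h - nxt) = nxt := by ring
          rw [this, show ((m + 1) + 1).toNat = (m + 1).toNat + 1 by omega,
            List.replicate_succ']
          simp
        rw [hshape] at hrounds
        rw [sumSq_perm _ _ (specIter_perm _ _ _ hrounds)]
        exact ih nxt (m + 1) (k - (m + 1) * (h - nxt)) (by omega) (by omega)
          (fun x hx => (htl2 x hx).1)
          (List.pairwise_cons.mp hsort).2
      · rw [if_neg hble]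
        push_neg at hble
        rw [terminal_case (m + 1) h nxt k (nxt :: tl2) (by omega) hk (by omega) (by omega) htl2]
        rw [PySem.List.foldl_add (nxt :: tl2) (fun f => f * f)]
        rfl

-- ===== glue =====
theorem counter_values_pos (s : String) :
    ∀ x ∈ (PySem.Dict.counter s.toList).values, 0 < x := by
  intro x hx
  have hv : (PySem.Dict.counter s.toList).values
      = ((PySem.Set.ofList s.toList).map (fun c => (c, (s.toList.count c : Int)))).map Prod.snd := by
    simp only [PySem.Dict.values, PySem.Dict.items_counter]
  rw [hv, List.map_map] at hx
  obtain ⟨c, hc, rfl⟩ := List.mem_map.mp hx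
  have hmem : c ∈ s.toList := (PySem.Set.mem_ofList _ _).mp hc
  have := List.count_pos_iff.mpr hmem
  simp only [Function.comp_apply]
  exact_mod_cast this

theorem minValue_eq (s : String) (k : Int) :
    minValue s k = sumSq (specIter k (PySem.Dict.counter s.toList).values) := by
  simp only [minValue]
  rw [heapLoopA_spec k (PySem.Dict.counter s.toList).values]
  rw [PySem.List.foldl_add _ (fun f => f ^ 2)]
  simp [sumSq, List.map_map, Function.comp_def, pow_two]

theorem minValue_alt_eq (s : String) (k : Int) :
    minValue_alt s k = sumSq (specIter k (PySem.Dict.counter s.toList).values) := by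
  simp only [minValue_alt]
  set vals := (PySem.Dict.counter s.toList).values with hvals
  have hperm : (PySem.List.sorted vals (fun x => x) true).Perm vals :=
    PySem.List.sorted_perm vals (fun x => x) true
  by_cases hk : k ≤ 0
  · rw [if_pos hk, specIter_nonpos k _ hk, PySem.List.foldl_add _ (fun f => f * f)]
    rw [sumSq_perm _ _ hperm.symm]
    simp [sumSq]
  · rw [if_neg hk]
    cases hs : PySem.List.sorted vals (fun x => x) true with
    | nil =>
        have : vals = [] := List.perm_nil.mp (hs ▸ hperm.symm)
        rw [this, specIter_nil]
        simp [bGo, sumSq]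
    | cons h tl =>
        rw [hs] at hperm
        have hpos : ∀ x ∈ h :: tl, 0 < x := fun x hx =>
          counter_values_pos s x (hperm.mem_iff.mp hx)
        have hsort : (h :: tl).Pairwise (fun a b => b ≤ a) := by
          have := PySem.List.sorted_pairwise_rev vals (fun x => x)
          rw [hs] at this
          exact this
        rw [bGo_spec tl h 0 k (by omega) le_rfl hpos hsort]
        have h1 : ((0:Int) + 1).toNat = 1 := rfl
        rw [h1]
        have h2 : List.replicate 1 h ++ tl = h :: tl := by simp [List.replicate]
        rw [h2]
        exact sumSq_perm _ _ (specIter_perm k _ _ hperm)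

-- ===== VERDICT (by name: the statement is the Claim_ definition above) =====
theorem minValue_spec : Claim_equal_minValue := by
  intro s k _
  unfold Spec_minValue
  rw [minValue_eq, minValue_alt_eq]
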